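-- pv_equiv track=rewrite | github.com/xujiahe1/mhyadventure | backend/tools/normalize_npcs.py | build_id_mapping
-- ===== SOURCE A (Python) =====
-- PRESERVE_KEYS = set()
--
-- def collect_existing_numbers(npcs):
--     nums = set()
--     for key in npcs.keys():
--         if key.startswith("NPC_"):
--             suffix = key.replace("NPC_", "")
--             if suffix.isdigit():
--                 nums.add(int(suffix))
--     return nums
--
-- def next_npc_id(existing_nums):
--     n = max(existing_nums) + 1 if existing_nums else 1001
--     while n in existing_nums:
--         n += 1
--     existing_nums.add(n)
--     return f"NPC_{n:04d}"
--
-- def build_id_mapping(npcs):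
--     existing_nums = collect_existing_numbers(npcs)
--     mapping = {}
--     for old_key in list(npcs.keys()):
--         if old_key in PRESERVE_KEYS:
--             mapping[old_key] = old_key
--             continue
--         if old_key.startswith("NPC_"):
--             mapping[old_key] = old_key
--             # ensure data.id will be aligned later
--             continue
--         # assign new NPC_ id
--         new_key = next_npc_id(existing_nums)
--         mapping[old_key] = new_key
--     return mapping
-- ===== SOURCE B (Python) =====
-- PRESERVE_KEYS = set()
--
-- def build_id_mapping(npcs):
--     # One pass over the existing NPC_* numbers computes the next free id once;
--     # new keys then get sequential ids from a plain counter (no mutable set,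
--     # no repeated max(), no probing loop).
--     nums = {int(k.replace("NPC_", "")) for k in npcs
--             if k.startswith("NPC_") and k.replace("NPC_", "").isdigit()}
--     nxt = max(nums) + 1 if nums else 1001
--     out = {}
--     for k in npcs:
--         if k in PRESERVE_KEYS or k.startswith("NPC_"):
--             out[k] = k
--         else:
--             out[k] = f"NPC_{nxt:04d}"
--             nxt += 1
--     return out
-- ===== Notes on version B (the rewrite author's own statement) =====
-- stated objective: faster
-- what changed: A calls next_npc_id per new key, recomputing max() over a growing mutable set and running a membership-probing while loop each time; B computes the next free id once (max of the collected numbers + 1, else 1001) and assigns sequential ids from a plain integer counter in a single pass.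
import Mathlib
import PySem

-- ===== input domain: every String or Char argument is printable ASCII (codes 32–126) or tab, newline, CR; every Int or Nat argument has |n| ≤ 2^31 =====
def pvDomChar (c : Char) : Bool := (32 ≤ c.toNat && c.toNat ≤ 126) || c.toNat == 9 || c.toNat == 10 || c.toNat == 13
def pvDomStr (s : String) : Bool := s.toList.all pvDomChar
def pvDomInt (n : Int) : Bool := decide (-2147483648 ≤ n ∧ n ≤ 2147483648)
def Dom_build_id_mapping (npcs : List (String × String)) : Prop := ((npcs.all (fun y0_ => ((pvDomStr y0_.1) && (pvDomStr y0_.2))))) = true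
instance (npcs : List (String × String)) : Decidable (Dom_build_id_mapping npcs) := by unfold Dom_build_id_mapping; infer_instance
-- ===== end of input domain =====

-- B replaces A's per-key next_npc_id (max over a growing mutable set + probing while loop)
-- by one up-front computation of the next free id and a sequential counter.

-- ===== PORT A =====

def PRESERVE_KEYS : PySem.Set String := PySem.Set.empty

-- f"NPC_{n:04d}": exact for n ≥ 0 (every id A or B formats is ≥ 1: the collected
-- numbers come from .isdigit() suffixes, hence are nonnegative); shared f-string helper.
def fmtNPC (n : Int) : String :=
  String.ofList ('N' :: 'P' :: 'C' :: '_' :: PySem.Chars.zfill (PySem.Int.toChars n) 4)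

-- collect_existing_numbers(npcs): loop over the dict's keys building a set
def collect_existing_numbers (ks : List String) : PySem.Set Int :=
  ks.foldl (fun S k =>
    if PySem.Str.startswith k "NPC_" then
      let suffix := PySem.Str.replace k "NPC_" ""
      -- int(suffix): ofStr? is some on every .isdigit() string, so getD 0 is exact here
      if PySem.Str.strIsdigit suffix then PySem.Set.add S ((PySem.Int.ofStr? suffix).getD 0)
      else S
    else S) PySem.Set.empty

-- the 'while n in existing_nums: n += 1' loop; fuel |S|+1 suffices (at most |S|
-- consecutive integers can be members, so the loop exits within |S| increments)
def nextLoop (S : PySem.Set Int) (n : Int) : Nat → Int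
  | 0 => n
  | fuel + 1 => if S.contains n then nextLoop S (n + 1) fuel else n

-- next_npc_id(existing_nums): returns the mutated set together with the new id string
def next_npc_id (S : PySem.Set Int) : PySem.Set Int × String :=
  let n0 : Int := match PySem.List.max? S (fun x => x) with
    | some m => m + 1
    | none => 1001
  let n := nextLoop S n0 (S.length + 1)
  (PySem.Set.add S n, fmtNPC n)

def build_id_mapping (npcs : List (String × String)) : List (String × String) :=
  let ks := PySem.Set.ofList (npcs.map (·.1))   -- list(npcs.keys())
  let existing := collect_existing_numbers ks
  let res := ks.foldl (fun (st : PySem.Set Int × PySem.Dict String String) k =>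
      if PRESERVE_KEYS.contains k then (st.1, st.2.insert k k)
      else if PySem.Str.startswith k "NPC_" then (st.1, st.2.insert k k)
      else
        let r := next_npc_id st.1
        (r.1, st.2.insert k r.2)) (existing, PySem.Dict.empty)
  res.2.items

-- ===== PORT B =====

-- the set-comprehension filter: the number of an "NPC_<digits>" key, else none
def numOf (k : String) : Option Int :=
  if PySem.Str.startswith k "NPC_" && PySem.Str.strIsdigit (PySem.Str.replace k "NPC_" "") then
    some ((PySem.Int.ofStr? (PySem.Str.replace k "NPC_" "")).getD 0)
  else none

def build_id_mapping_alt (npcs : List (String × String)) : List (String × String) :=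
  let ks := PySem.Set.ofList (npcs.map (·.1))   -- iteration over the dict's keys
  let nums : PySem.Set Int := PySem.Set.ofList (ks.filterMap numOf)
  let start : Int := match PySem.List.max? nums (fun x => x) with
    | some m => m + 1
    | none => 1001
  let res := ks.foldl (fun (st : Int × PySem.Dict String String) k =>
      if PRESERVE_KEYS.contains k || PySem.Str.startswith k "NPC_" then (st.1, st.2.insert k k)
      else (st.1 + 1, st.2.insert k (fmtNPC st.1))) (start, PySem.Dict.empty)
  res.2.items

-- ===== PRECONDITION & SPEC =====
def Spec_build_id_mapping (npcs : List (String × String)) (out : List (String × String)) : Prop := out = build_id_mapping_alt npcs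
instance (npcs : List (String × String)) (out : List (String × String)) : Decidable (Spec_build_id_mapping npcs out) := by unfold Spec_build_id_mapping; infer_instance

-- ===== CLAIM (what is proved, stated in full; the proofs are below) =====
def Claim_equal_build_id_mapping : Prop := ∀ (npcs : List (String × String)), Dom_build_id_mapping npcs → Spec_build_id_mapping npcs (build_id_mapping npcs)

-- ===== LEMMAS AND PROOFS =====

-- the invariant tying A's mutable set to B's counter: every member is below the
-- counter, and the counter is exactly max+1 (1001 on the empty set)
def StInv (S : PySem.Set Int) (nxt : Int) : Prop :=
  (∀ x ∈ S, x < nxt) ∧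
  (match PySem.List.max? S (fun x => x) with
   | some m => nxt = m + 1
   | none => nxt = 1001)

theorem collect_fold_update (ks : List String) (S : PySem.Set Int) :
    ks.foldl (fun S k =>
      if PySem.Str.startswith k "NPC_" then
        let suffix := PySem.Str.replace k "NPC_" ""
        if PySem.Str.strIsdigit suffix then PySem.Set.add S ((PySem.Int.ofStr? suffix).getD 0)
        else S
      else S) S = PySem.Set.update S (ks.filterMap numOf) := by
  induction ks generalizing S with
  | nil => simp [PySem.Set.update_nil]
  | cons k ks ih =>
    by_cases h1 : PySem.Str.startswith k "NPC_"
    · by_cases h2 : PySem.Str.strIsdigit (PySem.Str.replace k "NPC_" "")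
      · simp only [List.foldl_cons, List.filterMap_cons, numOf, h1, h2, if_true,
          Bool.and_self]
        rw [PySem.Set.update_cons]
        exact ih _
      · simp only [List.foldl_cons, List.filterMap_cons, numOf, h1, h2]
        simp only [Bool.and_false, if_true, if_false, Bool.false_eq_true]
        exact ih _
    · simp only [List.foldl_cons, List.filterMap_cons, numOf, h1]
      simp only [Bool.false_and, if_false, Bool.false_eq_true]
      exact ih _

theorem collect_eq_filterMap (ks : List String) :
    collect_existing_numbers ks = PySem.Set.ofList (ks.filterMap numOf) := by
  unfold collect_existing_numbers
  rw [show (PySem.Set.empty : PySem.Set Int) = [] from rfl] at *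
  rw [collect_fold_update, PySem.Set.update_nil_left]

theorem max?_append_of_lt (S : List Int) (a : Int) (h : ∀ x ∈ S, x < a) :
    PySem.List.max? (S ++ [a]) (fun x => x) = some a := by
  cases S with
  | nil => simp [PySem.List.max?_id_cons]
  | cons x t =>
    rw [List.cons_append, PySem.List.max?_id_cons, List.foldl_append]
    have hx : t.foldl max x < a := by
      rcases PySem.List.foldl_max_mem t x with h' | h'
      · rw [h']; exact h x (by simp)
      · exact h _ (by simp [h'])
    simp only [List.foldl_cons, List.foldl_nil]
    rw [max_eq_right (le_of_lt hx)]

theorem next_npc_id_of_inv (S : PySem.Set Int) (nxt : Int) (h : StInv S nxt) :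
    next_npc_id S = (S ++ [nxt], fmtNPC nxt) ∧ StInv (S ++ [nxt]) (nxt + 1) := by
  obtain ⟨hlt, hmx⟩ := h
  have hnc : S.contains nxt = false := by
    simp only [PySem.Set.contains_eq_listContains, List.contains_eq_mem, decide_eq_false_iff_not]
    intro hmem; exact absurd (hlt _ hmem) (lt_irrefl nxt)
  have hn0 : (match PySem.List.max? S (fun x => x) with
      | some m => m + 1
      | none => (1001 : Int)) = nxt := by
    cases hm : PySem.List.max? S (fun x => x) with
    | none => rw [hm] at hmx; exact hmx.symm
    | some m => rw [hm] at hmx; exact hmx.symm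
  have hadd : PySem.Set.add S nxt = S ++ [nxt] := by
    show (if S.contains nxt then S else S ++ [nxt]) = S ++ [nxt]
    rw [hnc]; simp
  have hloop : nextLoop S nxt (S.length + 1) = nxt := by
    show (if S.contains nxt = true then nextLoop S (nxt + 1) S.length else nxt) = nxt
    rw [hnc]; simp
  constructor
  · unfold next_npc_id
    rw [hn0]
    show (PySem.Set.add S (nextLoop S nxt (S.length + 1)),
        fmtNPC (nextLoop S nxt (S.length + 1))) = (S ++ [nxt], fmtNPC nxt)
    rw [hloop, hadd]
  · constructor
    · intro x hx
      rcases List.mem_append.mp hx with h' | h'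
      · exact lt_trans (hlt _ h') (by omega)
      · simp at h'; omega
    · rw [max?_append_of_lt S nxt hlt]

theorem stInv_init (S : PySem.Set Int) :
    StInv S (match PySem.List.max? S (fun x => x) with | some m => m + 1 | none => 1001) := by
  unfold StInv
  cases hm : PySem.List.max? S (fun x => x) with
  | none =>
    have hnil : S = [] := (PySem.List.max?_eq_none_iff S _).mp hm
    refine ⟨?_, rfl⟩
    intro x hx; rw [hnil] at hx; cases hx
  | some m =>
    refine ⟨?_, rfl⟩
    intro x hx
    exact Int.lt_add_one_iff.mpr (PySem.List.max?_isMax hm x hx)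

theorem loop_eq (ks : List String) (S : PySem.Set Int) (nxt : Int)
    (d : PySem.Dict String String) (h : StInv S nxt) :
    (ks.foldl (fun (st : PySem.Set Int × PySem.Dict String String) k =>
      if PRESERVE_KEYS.contains k then (st.1, st.2.insert k k)
      else if PySem.Str.startswith k "NPC_" then (st.1, st.2.insert k k)
      else
        let r := next_npc_id st.1
        (r.1, st.2.insert k r.2)) (S, d)).2 =
    (ks.foldl (fun (st : Int × PySem.Dict String String) k =>
      if PRESERVE_KEYS.contains k || PySem.Str.startswith k "NPC_" then (st.1, st.2.insert k k)
      else (st.1 + 1, st.2.insert k (fmtNPC st.1))) (nxt, d)).2 := by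
  induction ks generalizing S nxt d with
  | nil => rfl
  | cons k ks ih =>
    have hp : PRESERVE_KEYS.contains k = false := rfl
    by_cases hs : PySem.Str.startswith k "NPC_"
    · simp only [List.foldl_cons, hp, hs, Bool.false_or, if_true, if_false, Bool.false_eq_true]
      exact ih S nxt _ h
    · obtain ⟨hstep, hinv⟩ := next_npc_id_of_inv S nxt h
      simp only [List.foldl_cons, hp, hs, Bool.false_or, if_false, Bool.false_eq_true, hstep]
      exact ih _ _ _ hinv

-- ===== VERDICT (by name: the statement is the Claim_ definition above) =====
theorem build_id_mapping_spec : Claim_equal_build_id_mapping := by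
  intro npcs _
  show build_id_mapping npcs = build_id_mapping_alt npcs
  simp only [build_id_mapping, build_id_mapping_alt, collect_eq_filterMap]
  exact congrArg PySem.Dict.items (loop_eq _ _ _ _ (stInv_init _))
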